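-- pv_equiv track=rewrite | github.com/LeventhalLab/skilled_reaching_pipeline | reconstruct_3d.py | find_reaching_pawparts
-- ===== SOURCE A (Python) =====
-- def find_reaching_pawparts(bodyparts, paw_pref, mcp_string='mcp', pip_string='pip', dig_string='dig', pawdorsum_string='pawdorsum', palm_string='palm'):
--
--     test_mcp_string = paw_pref.lower() + mcp_string
--     test_pip_string = paw_pref.lower() + pip_string
--     test_dig_string = paw_pref.lower() + dig_string
--     test_pawdorsum_string = paw_pref.lower() + pawdorsum_string
--     test_palm_string = paw_pref.lower() + palm_string
--
--     mcp_idx = [i_bp for i_bp, bp in enumerate(bodyparts) if test_mcp_string in bp]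
--     pip_idx = [i_bp for i_bp, bp in enumerate(bodyparts) if test_pip_string in bp]
--     dig_idx = [i_bp for i_bp, bp in enumerate(bodyparts) if test_dig_string in bp]
--
--     pawdorsum_idx = [i_bp for i_bp, bp in enumerate(bodyparts) if test_pawdorsum_string in bp]
--     palm_idx = [i_bp for i_bp, bp in enumerate(bodyparts) if test_palm_string in bp]
--
--     # return the full list of paw part indices in the bodyparts list, but also paw dorsum and palm indices separately
--     return mcp_idx + pip_idx + dig_idx + pawdorsum_idx + palm_idx, pawdorsum_idx, palm_idx
-- ===== SOURCE B (Python) =====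
-- def find_reaching_pawparts(bodyparts, paw_pref, mcp_string='mcp', pip_string='pip', dig_string='dig', pawdorsum_string='pawdorsum', palm_string='palm'):
--     pl = paw_pref.lower()
--     tests = [pl + mcp_string, pl + pip_string, pl + dig_string,
--              pl + pawdorsum_string, pl + palm_string]
--     # one pass: tag every match with its category number
--     pairs = [(j, i) for i, bp in enumerate(bodyparts)
--              for j, t in enumerate(tests) if t in bp]
--     pawdorsum_idx = [i for j, i in pairs if j == 3]
--     palm_idx = [i for j, i in pairs if j == 4]
--     # stable sort groups the categories in order while keeping index order within each
--     ordered = sorted(pairs, key=lambda p: p[0])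
--     return [i for _, i in ordered], pawdorsum_idx, palm_idx
-- ===== Notes on version B (the rewrite author's own statement) =====
-- stated objective: alternative
-- what changed: Instead of A's five separate scans of bodyparts, B makes one tagging pass that emits (category, index) pairs for every substring match and then recovers the concatenated index list by a stable sort on the category tag (stability preserves within-category index order), reading the pawdorsum/palm lists off the tagged pairs.
import Mathlib
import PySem

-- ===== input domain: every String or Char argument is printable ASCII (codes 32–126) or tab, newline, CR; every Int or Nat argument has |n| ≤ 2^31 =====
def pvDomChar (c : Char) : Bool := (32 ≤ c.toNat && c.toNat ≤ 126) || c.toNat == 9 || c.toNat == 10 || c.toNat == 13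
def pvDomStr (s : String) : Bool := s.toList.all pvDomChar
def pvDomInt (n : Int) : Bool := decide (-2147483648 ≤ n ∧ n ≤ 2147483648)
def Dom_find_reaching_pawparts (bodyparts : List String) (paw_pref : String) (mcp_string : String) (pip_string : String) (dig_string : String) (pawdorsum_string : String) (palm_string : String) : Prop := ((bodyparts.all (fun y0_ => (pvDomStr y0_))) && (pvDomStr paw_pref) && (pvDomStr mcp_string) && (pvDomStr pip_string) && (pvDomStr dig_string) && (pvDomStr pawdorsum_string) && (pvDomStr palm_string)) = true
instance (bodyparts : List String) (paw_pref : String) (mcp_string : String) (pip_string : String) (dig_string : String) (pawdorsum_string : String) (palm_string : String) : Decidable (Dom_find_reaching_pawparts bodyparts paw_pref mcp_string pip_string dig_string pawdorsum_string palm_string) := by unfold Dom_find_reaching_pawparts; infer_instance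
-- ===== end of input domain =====

-- ===== PORT A =====
-- B rebuilds A's five-scan result from one tagging pass over bodyparts plus a stable sort on the category tag.
-- [i_bp for i_bp, bp in enumerate(bodyparts) if test in bp]
def pvComp (test : String) (bodyparts : List String) : List Int :=
  (PySem.List.enumerate bodyparts 0).filterMap
    (fun p => if PySem.Str.isIn test p.2 then some p.1 else none)

def find_reaching_pawparts (bodyparts : List String) (paw_pref : String) (mcp_string : String) (pip_string : String) (dig_string : String) (pawdorsum_string : String) (palm_string : String) : List Int × List Int × List Int :=
  let test_mcp_string := PySem.Str.lower paw_pref ++ mcp_string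
  let test_pip_string := PySem.Str.lower paw_pref ++ pip_string
  let test_dig_string := PySem.Str.lower paw_pref ++ dig_string
  let test_pawdorsum_string := PySem.Str.lower paw_pref ++ pawdorsum_string
  let test_palm_string := PySem.Str.lower paw_pref ++ palm_string
  let mcp_idx := pvComp test_mcp_string bodyparts
  let pip_idx := pvComp test_pip_string bodyparts
  let dig_idx := pvComp test_dig_string bodyparts
  let pawdorsum_idx := pvComp test_pawdorsum_string bodyparts
  let palm_idx := pvComp test_palm_string bodyparts
  (mcp_idx ++ pip_idx ++ dig_idx ++ pawdorsum_idx ++ palm_idx, pawdorsum_idx, palm_idx)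

-- ===== PORT B =====
-- pairs = [(j, i) for i, bp in enumerate(bodyparts) for j, t in enumerate(tests) if t in bp]
def pvPairs (tests : List String) (bodyparts : List String) : List (Int × Int) :=
  (PySem.List.enumerate bodyparts 0).flatMap
    (fun p => (PySem.List.enumerate tests 0).filterMap
      (fun q => if PySem.Str.isIn q.2 p.2 then some (q.1, p.1) else none))

def find_reaching_pawparts_alt (bodyparts : List String) (paw_pref : String) (mcp_string : String) (pip_string : String) (dig_string : String) (pawdorsum_string : String) (palm_string : String) : List Int × List Int × List Int :=
  let pl := PySem.Str.lower paw_pref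
  let tests := [pl ++ mcp_string, pl ++ pip_string, pl ++ dig_string, pl ++ pawdorsum_string, pl ++ palm_string]
  let pairs := pvPairs tests bodyparts
  let pawdorsum_idx := (pairs.filter (fun p => p.1 == 3)).map (fun p => p.2)
  let palm_idx := (pairs.filter (fun p => p.1 == 4)).map (fun p => p.2)
  let ordered := PySem.List.sorted pairs (fun p => p.1) false
  (ordered.map (fun p => p.2), pawdorsum_idx, palm_idx)

-- ===== PRECONDITION & SPEC =====
def Spec_find_reaching_pawparts (bodyparts : List String) (paw_pref : String) (mcp_string : String) (pip_string : String) (dig_string : String) (pawdorsum_string : String) (palm_string : String) (out : List Int × List Int × List Int) : Prop := out = find_reaching_pawparts_alt bodyparts paw_pref mcp_string pip_string dig_string pawdorsum_string palm_string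
instance (bodyparts : List String) (paw_pref : String) (mcp_string : String) (pip_string : String) (dig_string : String) (pawdorsum_string : String) (palm_string : String) (out : List Int × List Int × List Int) : Decidable (Spec_find_reaching_pawparts bodyparts paw_pref mcp_string pip_string dig_string pawdorsum_string palm_string out) := by unfold Spec_find_reaching_pawparts; infer_instance

-- ===== CLAIM (what is proved, stated in full; the proofs are below) =====
def Claim_equal_find_reaching_pawparts : Prop := ∀ (bodyparts : List String) (paw_pref : String) (mcp_string : String) (pip_string : String) (dig_string : String) (pawdorsum_string : String) (palm_string : String), Dom_find_reaching_pawparts bodyparts paw_pref mcp_string pip_string dig_string pawdorsum_string palm_string → Spec_find_reaching_pawparts bodyparts paw_pref mcp_string pip_string dig_string pawdorsum_string palm_string (find_reaching_pawparts bodyparts paw_pref mcp_string pip_string dig_string pawdorsum_string palm_string)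

-- ===== LEMMAS AND PROOFS =====

-- selecting the pairs tagged j out of pvPairs recovers A's j-th comprehension
theorem pvPairs_filter (t1 t2 t3 t4 t5 : String) (j : Int) (t : String)
    (hsel : ∀ (i : Int) (bp : String),
      (((PySem.List.enumerate [t1, t2, t3, t4, t5] 0).filterMap
          (fun q => if PySem.Str.isIn q.2 bp then some (q.1, i) else none)).filter
        (fun p => p.1 == j)).map (fun p => p.2) =
        (if PySem.Str.isIn t bp then [i] else [])) :
    ∀ (l : List (Int × String)),
      ((l.flatMap (fun p => (PySem.List.enumerate [t1, t2, t3, t4, t5] 0).filterMap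
          (fun q => if PySem.Str.isIn q.2 p.2 then some (q.1, p.1) else none))).filter
        (fun p => p.1 == j)).map (fun p => p.2) =
        l.filterMap (fun p => if PySem.Str.isIn t p.2 then some p.1 else none) := by
  intro l
  induction l with
  | nil => simp
  | cons p l ih =>
    simp only [List.flatMap_cons, List.filter_append, List.map_append, ih,
      List.filterMap_cons]
    rw [hsel p.1 p.2]
    split_ifs <;> simp

-- the inner comprehension over the concrete five-test list, written out
theorem pvInner_expand (t1 t2 t3 t4 t5 bp : String) (i : Int) :
      ((PySem.List.enumerate [t1, t2, t3, t4, t5] 0).filterMap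
          (fun q => if PySem.Str.isIn q.2 bp then some (q.1, i) else none))
      = ((if PySem.Str.isIn t1 bp then [((0:Int), i)] else []) ++
         (if PySem.Str.isIn t2 bp then [((1:Int), i)] else []) ++
         (if PySem.Str.isIn t3 bp then [((2:Int), i)] else []) ++
         (if PySem.Str.isIn t4 bp then [((3:Int), i)] else []) ++
         (if PySem.Str.isIn t5 bp then [((4:Int), i)] else [])) := by
  simp only [PySem.List.enumerate_cons, PySem.List.enumerate_nil, List.filterMap_cons,
    List.filterMap_nil]
  norm_num
  split_ifs <;> simp

-- the concrete selectors for the five tags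
theorem pvSel (t1 t2 t3 t4 t5 : String) (j : Nat) (hj : j < 5) :
    ∀ (i : Int) (bp : String),
      (((PySem.List.enumerate [t1, t2, t3, t4, t5] 0).filterMap
          (fun q => if PySem.Str.isIn q.2 bp then some (q.1, i) else none)).filter
        (fun p => p.1 == (j : Int))).map (fun p => p.2) =
        (if PySem.Str.isIn ([t1, t2, t3, t4, t5][j]'hj) bp then [i] else []) := by
  intro i bp
  rw [pvInner_expand]
  interval_cases j <;>
    simp only [List.filter_append, List.map_append, List.getElem_cons_zero,
      List.getElem_cons_succ] <;>
    split_ifs <;> simp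

-- every tag produced by pvPairs with a 5-element test list is one of 0..4
theorem pvPairs_keys (t1 t2 t3 t4 t5 : String) (bodyparts : List String) :
    ∀ p ∈ pvPairs [t1, t2, t3, t4, t5] bodyparts,
      p.1 = 0 ∨ p.1 = 1 ∨ p.1 = 2 ∨ p.1 = 3 ∨ p.1 = 4 := by
  intro p hp
  simp only [pvPairs, List.mem_flatMap] at hp
  obtain ⟨a, -, hmem⟩ := hp
  rw [pvInner_expand] at hmem
  simp only [List.mem_append] at hmem
  rcases hmem with ((((h | h) | h) | h) | h) <;> split_ifs at h <;> simp_all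

-- insertBy skips a prefix it does not belong before
theorem pvInsertBy_middle {α : Type} (bf : α → α → Bool) (x : α) (as bs : List α)
    (h : ∀ a ∈ as, bf x a = false) :
    PySem.List.insertBy bf x (as ++ bs) = as ++ PySem.List.insertBy bf x bs := by
  induction as with
  | nil => simp
  | cons a as ih =>
    simp only [List.cons_append, PySem.List.insertBy, h a (by simp)]
    simp only [Bool.false_eq_true, if_false, List.cons.injEq, true_and]
    exact ih (fun a ha => h a (by simp [ha]))

-- insertBy puts x in front of a suffix it belongs before
theorem pvInsertBy_front {α : Type} (bf : α → α → Bool) (x : α) (bs : List α)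
    (h : ∀ b ∈ bs, bf x b = true) :
    PySem.List.insertBy bf x bs = x :: bs := by
  cases bs with
  | nil => rfl
  | cons b bs => simp [PySem.List.insertBy, h b (by simp)]

-- the insertion-sort fold over 0..4-tagged pairs fills five buckets in tag order
theorem pvFold_buckets :
    ∀ (l c0 c1 c2 c3 c4 : List (Int × Int)),
      (∀ p ∈ l, p.1 = 0 ∨ p.1 = 1 ∨ p.1 = 2 ∨ p.1 = 3 ∨ p.1 = 4) →
      (∀ p ∈ c0, p.1 = 0) → (∀ p ∈ c1, p.1 = 1) → (∀ p ∈ c2, p.1 = 2) →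
      (∀ p ∈ c3, p.1 = 3) → (∀ p ∈ c4, p.1 = 4) →
      l.foldl (fun acc x => PySem.List.insertBy (fun a b => decide (a.1 < b.1)) x acc)
        (c0 ++ c1 ++ c2 ++ c3 ++ c4) =
        (c0 ++ l.filter (fun p => p.1 == 0)) ++ (c1 ++ l.filter (fun p => p.1 == 1)) ++
        (c2 ++ l.filter (fun p => p.1 == 2)) ++ (c3 ++ l.filter (fun p => p.1 == 3)) ++
        (c4 ++ l.filter (fun p => p.1 == 4)) := by
  intro l
  induction l with
  | nil =>
    intro c0 c1 c2 c3 c4 _ _ _ _ _ _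
    simp
  | cons x l ih =>
    intro c0 c1 c2 c3 c4 hl h0 h1 h2 h3 h4
    have hx := hl x (by simp)
    have hl' : ∀ p ∈ l, p.1 = 0 ∨ p.1 = 1 ∨ p.1 = 2 ∨ p.1 = 3 ∨ p.1 = 4 :=
      fun p hp => hl p (by simp [hp])
    simp only [List.foldl_cons]
    rcases hx with hx | hx | hx | hx | hx
    · rw [show c0 ++ c1 ++ c2 ++ c3 ++ c4 = c0 ++ (c1 ++ c2 ++ c3 ++ c4) by simp]
      rw [pvInsertBy_middle _ _ c0 _ (by intro a ha; simp [h0 a ha, hx])]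
      rw [pvInsertBy_front _ _ _ (by
            intro b hb
            simp only [List.mem_append, or_assoc] at hb
            rcases hb with hb | hb | hb | hb
            · simp [h1 b hb, hx]
            · simp [h2 b hb, hx]
            · simp [h3 b hb, hx]
            · simp [h4 b hb, hx])]
      rw [show c0 ++ (x :: (c1 ++ c2 ++ c3 ++ c4))
            = (c0 ++ [x]) ++ c1 ++ c2 ++ c3 ++ c4 by simp]
      rw [ih (c0 ++ [x]) c1 c2 c3 c4 hl'
            (by intro p hp
                rcases List.mem_append.1 hp with h | h
                · exact h0 p h
                · simp at h; simp [h, hx]) h1 h2 h3 h4]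
      simp [hx]
    · rw [show c0 ++ c1 ++ c2 ++ c3 ++ c4 = (c0 ++ c1) ++ (c2 ++ c3 ++ c4) by simp]
      rw [pvInsertBy_middle _ _ (c0 ++ c1) _ (by
            intro a ha
            rcases List.mem_append.1 ha with h | h
            · simp [h0 a h, hx]
            · simp [h1 a h, hx])]
      rw [pvInsertBy_front _ _ _ (by
            intro b hb
            simp only [List.mem_append, or_assoc] at hb
            rcases hb with hb | hb | hb
            · simp [h2 b hb, hx]
            · simp [h3 b hb, hx]
            · simp [h4 b hb, hx])]
      rw [show (c0 ++ c1) ++ (x :: (c2 ++ c3 ++ c4))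
            = c0 ++ (c1 ++ [x]) ++ c2 ++ c3 ++ c4 by simp]
      rw [ih c0 (c1 ++ [x]) c2 c3 c4 hl' h0
            (by intro p hp
                rcases List.mem_append.1 hp with h | h
                · exact h1 p h
                · simp at h; simp [h, hx]) h2 h3 h4]
      simp [hx]
    · rw [show c0 ++ c1 ++ c2 ++ c3 ++ c4 = (c0 ++ c1 ++ c2) ++ (c3 ++ c4) by simp]
      rw [pvInsertBy_middle _ _ (c0 ++ c1 ++ c2) _ (by
            intro a ha
            simp only [List.mem_append, or_assoc] at ha
            rcases ha with h | h | h
            · simp [h0 a h, hx]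
            · simp [h1 a h, hx]
            · simp [h2 a h, hx])]
      rw [pvInsertBy_front _ _ _ (by
            intro b hb
            rcases List.mem_append.1 hb with h | h
            · simp [h3 b h, hx]
            · simp [h4 b h, hx])]
      rw [show (c0 ++ c1 ++ c2) ++ (x :: (c3 ++ c4))
            = c0 ++ c1 ++ (c2 ++ [x]) ++ c3 ++ c4 by simp]
      rw [ih c0 c1 (c2 ++ [x]) c3 c4 hl' h0 h1
            (by intro p hp
                rcases List.mem_append.1 hp with h | h
                · exact h2 p h
                · simp at h; simp [h, hx]) h3 h4]
      simp [hx]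
    · rw [show c0 ++ c1 ++ c2 ++ c3 ++ c4 = (c0 ++ c1 ++ c2 ++ c3) ++ c4 by simp]
      rw [pvInsertBy_middle _ _ (c0 ++ c1 ++ c2 ++ c3) _ (by
            intro a ha
            simp only [List.mem_append, or_assoc] at ha
            rcases ha with h | h | h | h
            · simp [h0 a h, hx]
            · simp [h1 a h, hx]
            · simp [h2 a h, hx]
            · simp [h3 a h, hx])]
      rw [pvInsertBy_front _ _ _ (fun b hb => by simp [h4 b hb, hx])]
      rw [show (c0 ++ c1 ++ c2 ++ c3) ++ (x :: c4)
            = c0 ++ c1 ++ c2 ++ (c3 ++ [x]) ++ c4 by simp]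
      rw [ih c0 c1 c2 (c3 ++ [x]) c4 hl' h0 h1 h2
            (by intro p hp
                rcases List.mem_append.1 hp with h | h
                · exact h3 p h
                · simp at h; simp [h, hx]) h4]
      simp [hx]
    · rw [PySem.List.insertBy_of_forall_not_before _ _ _ (by
            intro a ha
            simp only [List.mem_append, or_assoc] at ha
            rcases ha with h | h | h | h | h
            · simp [h0 a h, hx]
            · simp [h1 a h, hx]
            · simp [h2 a h, hx]
            · simp [h3 a h, hx]
            · simp [h4 a h, hx])]
      rw [show (c0 ++ c1 ++ c2 ++ c3 ++ c4) ++ [x]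
            = c0 ++ c1 ++ c2 ++ c3 ++ (c4 ++ [x]) by simp]
      rw [ih c0 c1 c2 c3 (c4 ++ [x]) hl' h0 h1 h2 h3
            (by intro p hp
                rcases List.mem_append.1 hp with h | h
                · exact h4 p h
                · simp at h; simp [h, hx])]
      simp [hx]

-- the stable sort of the tagged pairs is exactly the five filters in tag order
theorem pvSorted_pvPairs (t1 t2 t3 t4 t5 : String) (bodyparts : List String) :
    PySem.List.sorted (pvPairs [t1, t2, t3, t4, t5] bodyparts) (fun p => p.1) false =
      (pvPairs [t1, t2, t3, t4, t5] bodyparts).filter (fun p => p.1 == 0) ++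
      (pvPairs [t1, t2, t3, t4, t5] bodyparts).filter (fun p => p.1 == 1) ++
      (pvPairs [t1, t2, t3, t4, t5] bodyparts).filter (fun p => p.1 == 2) ++
      (pvPairs [t1, t2, t3, t4, t5] bodyparts).filter (fun p => p.1 == 3) ++
      (pvPairs [t1, t2, t3, t4, t5] bodyparts).filter (fun p => p.1 == 4) := by
  rw [PySem.List.sorted_eq_foldl_insertBy]
  have := pvFold_buckets (pvPairs [t1, t2, t3, t4, t5] bodyparts) [] [] [] [] []
    (pvPairs_keys t1 t2 t3 t4 t5 bodyparts)
    (by simp) (by simp) (by simp) (by simp) (by simp)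
  simpa using this

-- filtering pvPairs at tag j and dropping the tag is A's j-th comprehension
theorem pvPairs_filter_eq (t1 t2 t3 t4 t5 : String) (bodyparts : List String)
    (j : Nat) (hj : j < 5) :
    ((pvPairs [t1, t2, t3, t4, t5] bodyparts).filter (fun p => p.1 == (j : Int))).map
        (fun p => p.2) =
      pvComp ([t1, t2, t3, t4, t5][j]'hj) bodyparts := by
  unfold pvPairs pvComp
  exact pvPairs_filter t1 t2 t3 t4 t5 (j : Int) ([t1, t2, t3, t4, t5][j]'hj)
    (pvSel t1 t2 t3 t4 t5 j hj) (PySem.List.enumerate bodyparts 0)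

-- ===== VERDICT (by name: the statement is the Claim_ definition above) =====
theorem find_reaching_pawparts_spec : Claim_equal_find_reaching_pawparts := by
  intro bodyparts paw_pref mcp_string pip_string dig_string pawdorsum_string palm_string _
  unfold Spec_find_reaching_pawparts find_reaching_pawparts find_reaching_pawparts_alt
  dsimp only
  rw [pvSorted_pvPairs]
  simp only [List.map_append]
  have h := fun (j : Nat) (hj : j < 5) =>
    pvPairs_filter_eq (PySem.Str.lower paw_pref ++ mcp_string)
      (PySem.Str.lower paw_pref ++ pip_string) (PySem.Str.lower paw_pref ++ dig_string)
      (PySem.Str.lower paw_pref ++ pawdorsum_string) (PySem.Str.lower paw_pref ++ palm_string)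
      bodyparts j hj
  have h0 := h 0 (by omega)
  have h1 := h 1 (by omega)
  have h2 := h 2 (by omega)
  have h3 := h 3 (by omega)
  have h4 := h 4 (by omega)
  norm_num at h0 h1 h2 h3 h4
  rw [h0, h1, h2, h3, h4]
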